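-- pv_equiv track=rewrite | github.com/IAmNotAndrey/Algorithms_course_2 | gcd_lcm.py | new_mas
-- ===== SOURCE A (Python) =====
-- def new_mas(mas1, mas2):
--     mas3 = []
--     dels = []
--
--     if len(mas1) < len(mas2):
--         mas1, mas2 = mas2, mas1
--
--     for n1 in mas1:
--         for n2 in mas2:
--             if n1 == n2:
--                 mas3.append(n2)
--                 dels.append(n1)
--                 mas2.remove(n2)
--                 break
--     for n in dels:
--         mas1.remove(n)
--     for n in mas1:
--         mas3.append(n)
--     for n in mas2:
--         mas3.append(n)
--
--     return mas3
-- ===== SOURCE B (Python) =====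
-- def new_mas(mas1, mas2):
--     # NOTE: unlike A, this does not mutate the input lists; return value is identical.
--     if len(mas1) < len(mas2):
--         mas1, mas2 = mas2, mas1
--     avail = {}
--     for x in mas2:
--         avail[x] = avail.get(x, 0) + 1
--     matched = []
--     rest1 = []
--     for x in mas1:
--         if avail.get(x, 0) > 0:
--             avail[x] -= 1
--             matched.append(x)
--         else:
--             rest1.append(x)
--     used = {}
--     for x in matched:
--         used[x] = used.get(x, 0) + 1
--     rest2 = []
--     for x in mas2:
--         if used.get(x, 0) > 0:
--             used[x] -= 1
--         else:
--             rest2.append(x)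
--     return matched + rest1 + rest2
-- ===== Notes on version B (the rewrite author's own statement) =====
-- stated objective: faster
-- what changed: Replaces A's nested scan with repeated list.remove (quadratic) by hash-counter passes: build a count map of the shorter list, one pass over the longer list splitting it into matched and leftover, and one counter pass over the shorter list emitting its leftovers; B also does not mutate the input lists (A does).
import Mathlib
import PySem

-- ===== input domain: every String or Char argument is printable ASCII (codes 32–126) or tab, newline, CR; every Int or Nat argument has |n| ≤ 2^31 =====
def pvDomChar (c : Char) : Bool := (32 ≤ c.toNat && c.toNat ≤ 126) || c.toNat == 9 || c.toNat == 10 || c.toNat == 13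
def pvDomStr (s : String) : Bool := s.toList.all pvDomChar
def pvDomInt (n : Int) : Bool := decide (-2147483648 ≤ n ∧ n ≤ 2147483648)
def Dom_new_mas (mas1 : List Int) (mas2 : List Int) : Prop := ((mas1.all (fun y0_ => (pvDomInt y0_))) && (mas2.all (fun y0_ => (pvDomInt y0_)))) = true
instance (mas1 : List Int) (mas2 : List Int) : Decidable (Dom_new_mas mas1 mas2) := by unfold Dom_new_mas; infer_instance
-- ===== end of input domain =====

-- B replaces A's quadratic nested scan / list.remove passes by O(n+m) counter passes;
-- equivalence is about the RETURN value only: A mutates both input lists in place, B mutates neither.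

-- ===== PORT A =====
-- inner loop 'for n2 in mas2: if n1 == n2: …; mas2.remove(n2); break': the element at the break
-- point is the FIRST occurrence of its value in mas2 (everything before it differs from n1 = n2),
-- so mas2.remove(n2) deletes exactly that element; this helper is that scan with the deletion done
-- at the break point — exact.
def pvInnerA (n1 : Int) : List Int → Option (Int × List Int)
  | [] => none
  | n2 :: rest =>
    if n1 = n2 then some (n2, rest)
    else
      match pvInnerA n1 rest with
      | some (v, rest') => some (v, n2 :: rest')
      | none => none

-- state (mas3, dels, mas2); one step of A's outer 'for n1 in mas1' loop
def pvStepA (s : List Int × List Int × List Int) (n1 : Int) : List Int × List Int × List Int :=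
  match pvInnerA n1 s.2.2 with
  | some (n2, mas2') => (s.1 ++ [n2], s.2.1 ++ [n1], mas2')
  | none => s

-- 'mas1.remove(n)'; the none branch is Python's ValueError, unreachable here (every del is present)
def pvRemStep (acc : List Int) (n : Int) : List Int :=
  match PySem.List.remove? acc n with
  | some l => l
  | none => acc

def new_mas (mas1 : List Int) (mas2 : List Int) : List Int :=
  if mas1.length < mas2.length then
    -- mas1, mas2 = mas2, mas1
    let s := mas2.foldl pvStepA ([], [], mas1)
    s.1 ++ (s.2.1.foldl pvRemStep mas2) ++ s.2.2
  else
    let s := mas1.foldl pvStepA ([], [], mas2)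
    s.1 ++ (s.2.1.foldl pvRemStep mas1) ++ s.2.2

-- ===== PORT B =====
-- d[x] = d.get(x, 0) + 1
def pvIncStep (d : PySem.Dict Int Int) (x : Int) : PySem.Dict Int Int :=
  d.insert x (d.getD x 0 + 1)

-- state (matched, rest1, avail); one step of B's splitting pass over the longer list
def pvStepB (t : List Int × List Int × PySem.Dict Int Int) (x : Int) :
    List Int × List Int × PySem.Dict Int Int :=
  if t.2.2.getD x 0 > 0 then (t.1 ++ [x], t.2.1, t.2.2.insert x (t.2.2.getD x 0 - 1))
  else (t.1, t.2.1 ++ [x], t.2.2)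

-- state (rest2, used); one step of B's leftover pass over the shorter list
def pvStepU (u : List Int × PySem.Dict Int Int) (x : Int) : List Int × PySem.Dict Int Int :=
  if u.2.getD x 0 > 0 then (u.1, u.2.insert x (u.2.getD x 0 - 1))
  else (u.1 ++ [x], u.2)

def pvCoreB (mas1 : List Int) (mas2 : List Int) : List Int :=
  let avail := mas2.foldl pvIncStep PySem.Dict.empty
  let t := mas1.foldl pvStepB ([], [], avail)
  let used := t.1.foldl pvIncStep PySem.Dict.empty
  t.1 ++ t.2.1 ++ (mas2.foldl pvStepU ([], used)).1

def new_mas_alt (mas1 : List Int) (mas2 : List Int) : List Int :=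
  if mas1.length < mas2.length then pvCoreB mas2 mas1 else pvCoreB mas1 mas2

-- ===== PRECONDITION & SPEC =====
def Spec_new_mas (mas1 : List Int) (mas2 : List Int) (out : List Int) : Prop := out = new_mas_alt mas1 mas2
instance (mas1 : List Int) (mas2 : List Int) (out : List Int) : Decidable (Spec_new_mas mas1 mas2 out) := by unfold Spec_new_mas; infer_instance

-- ===== CLAIM (what is proved, stated in full; the proofs are below) =====
def Claim_equal_new_mas : Prop := ∀ (mas1 : List Int) (mas2 : List Int), Dom_new_mas mas1 mas2 → Spec_new_mas mas1 mas2 (new_mas mas1 mas2)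

-- ===== LEMMAS AND PROOFS =====

-- multiset counter of a list, as a function
def pvCnt (m : List Int) : Int → Nat := fun v => m.count v

-- drop, left to right, the occurrences a counter pays for
def pvSkip : (Int → Nat) → List Int → List Int
  | _, [] => []
  | c, x :: l => if c x > 0 then pvSkip (fun y => if y = x then c y - 1 else c y) l
                 else x :: pvSkip c l

lemma pvInnerA_eq (n : Int) (l : List Int) :
    pvInnerA n l = if n ∈ l then some (n, l.erase n) else none := by
  induction l with
  | nil => simp [pvInnerA]
  | cons x rest ih =>
    by_cases h : n = x
    · subst h; simp [pvInnerA, List.erase_cons_head]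
    · have hx : ¬ (x = n) := fun hh => h hh.symm
      by_cases hm : n ∈ rest
      · simp [pvInnerA, h, ih, hm, hx]
      · simp [pvInnerA, h, ih, hm]

lemma pvSkip_incr (v : Int) (l : List Int) :
    ∀ c : Int → Nat, pvSkip (fun y => if y = v then c y + 1 else c y) l = pvSkip c (l.erase v) := by
  induction l with
  | nil => intro c; simp [pvSkip]
  | cons x l ih =>
    intro c
    by_cases hxv : x = v
    · subst hxv
      have hdec : (fun y => if y = x then (if y = x then c y + 1 else c y) - 1
                             else (if y = x then c y + 1 else c y)) = c := by
        funext y; by_cases h : y = x <;> simp [h]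
      rw [List.erase_cons_head]
      show (if (if x = x then c x + 1 else c x) > 0 then _ else _) = _
      rw [if_pos rfl, if_pos (Nat.add_pos_right _ Nat.one_pos)]
      simpa using congrArg (fun c => pvSkip c l) hdec
    · rw [List.erase_cons_tail (by simpa using hxv)]
      show (if (if x = v then c x + 1 else c x) > 0 then _ else _)
          = (if c x > 0 then _ else _)
      rw [if_neg hxv]
      by_cases hc : c x > 0
      · rw [if_pos hc, if_pos hc]
        have hcomm : (fun y => if y = x then (if y = v then c y + 1 else c y) - 1
                               else (if y = v then c y + 1 else c y))
            = (fun y => if y = v then (if y = x then c y - 1 else c y) + 1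
                        else (if y = x then c y - 1 else c y)) := by
          funext y
          by_cases h1 : y = x
          · subst h1; simp [hxv]
          · by_cases h2 : y = v <;>
              simp [h1, h2, show ¬ v = x from fun hh => hxv hh.symm]
        rw [hcomm, ih]
      · rw [if_neg hc, if_neg hc, ih]

lemma pvCnt_cons (x : Int) (m : List Int) :
    pvCnt (x :: m) = fun y => if y = x then pvCnt m y + 1 else pvCnt m y := by
  funext y
  by_cases h : y = x
  · simp [pvCnt, h]
  · simp [pvCnt, h, show ¬ x = y from fun hh => h hh.symm]

lemma pvSkip_zero (l : List Int) : pvSkip (fun _ => 0) l = l := by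
  induction l with
  | nil => simp [pvSkip]
  | cons x l ih => simp [pvSkip, ih]

lemma foldl_erase_eq_skip (m : List Int) :
    ∀ l : List Int, m.foldl (fun a n => a.erase n) l = pvSkip (pvCnt m) l := by
  induction m with
  | nil =>
    intro l
    have h0 : pvCnt ([] : List Int) = fun _ => 0 := by funext y; simp [pvCnt]
    rw [h0, pvSkip_zero]
    rfl
  | cons n m ih =>
    intro l
    have : pvSkip (pvCnt (n :: m)) l = pvSkip (pvCnt m) (l.erase n) := by
      rw [pvCnt_cons]; exact pvSkip_incr n l (pvCnt m)
    rw [this, List.foldl_cons]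
    exact ih (l.erase n)

lemma pvRemStep_eq_erase (acc : List Int) (n : Int) : pvRemStep acc n = acc.erase n := by
  by_cases h : n ∈ acc
  · simp [pvRemStep, PySem.List.remove?_eq_some_erase _ _ h]
  · rw [pvRemStep, (PySem.List.remove?_eq_none_iff acc n).2 h, List.erase_of_not_mem h]

lemma build_getD (l : List Int) :
    ∀ (d : PySem.Dict Int Int) (x : Int),
      (l.foldl pvIncStep d).getD x 0 = d.getD x 0 + l.count x := by
  induction l with
  | nil => intro d x; simp
  | cons y l ih =>
    intro d x
    rw [List.foldl_cons, ih]
    by_cases h : x = y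
    · subst h; simp [pvIncStep]; ring
    · have : ¬ ((x : Int) == y) = true := by simpa using h
      simp [pvIncStep, PySem.Dict.getD_insert, h,
        show ¬ y = x from fun hh => h hh.symm]

-- the two main loops, run in lockstep: A's loop over xs with the live list l, B's with a counter
-- dict d for l; both emit the same matched list M; B's rest1 is the counter-skip of xs by M; A's
-- final live list is the counter-skip of l by M.
lemma grand (xs : List Int) :
    ∀ (l : List Int) (c : Int → Nat) (d : PySem.Dict Int Int) (α δ μ ρ : List Int),
      (∀ x, d.getD x 0 = (c x : Int)) → (∀ x, c x = l.count x) →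
      ∃ M R d',
        xs.foldl pvStepA (α, δ, l) = (α ++ M, δ ++ M, pvSkip (pvCnt M) l)
        ∧ xs.foldl pvStepB (μ, ρ, d) = (μ ++ M, ρ ++ R, d')
        ∧ R = pvSkip (pvCnt M) xs
        ∧ (∀ v, pvCnt M v ≤ c v) := by
  induction xs with
  | nil =>
    intro l c d α δ μ ρ hd hc
    have h0 : pvCnt ([] : List Int) = fun _ => 0 := by funext y; simp [pvCnt]
    exact ⟨[], [], d, by simp [h0, pvSkip_zero], by simp, by simp [pvSkip], by simp [pvCnt]⟩
  | cons x xs ih =>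
    intro l c d α δ μ ρ hd hc
    by_cases hmem : x ∈ l
    · -- matched step
      have hcx : 0 < c x := by rw [hc]; exact List.count_pos_iff.2 hmem
      have hdx : d.getD x 0 > 0 := by rw [hd]; exact_mod_cast hcx
      have hstepA : pvStepA (α, δ, l) x = (α ++ [x], δ ++ [x], l.erase x) := by
        simp [pvStepA, pvInnerA_eq, hmem]
      have hstepB : pvStepB (μ, ρ, d) x
          = (μ ++ [x], ρ, d.insert x (d.getD x 0 - 1)) := by
        simp [pvStepB, hdx]
      have hd' : ∀ y, (d.insert x (d.getD x 0 - 1)).getD y 0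
          = (((fun y => if y = x then c y - 1 else c y) y : Nat) : Int) := by
        intro y
        rw [PySem.Dict.getD_insert]
        by_cases h : y = x
        · subst h; simp [hd]; omega
        · have : ¬ ((y : Int) == x) = true := by simpa using h
          simp [h, hd]
      have hc' : ∀ y, (fun y => if y = x then c y - 1 else c y) y = (l.erase x).count y := by
        intro y
        by_cases h : y = x
        · subst h; simp [List.count_erase_self, hc]
        · have : ¬ ((y : Int) == x) = true := by simpa using h
          simp [h, List.count_erase_of_ne (by simpa using h), hc]
      obtain ⟨M, R, d', hA, hB, hR, hle⟩ :=
        ih (l.erase x) (fun y => if y = x then c y - 1 else c y)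
          (d.insert x (d.getD x 0 - 1)) (α ++ [x]) (δ ++ [x]) (μ ++ [x]) ρ hd' hc'
      refine ⟨x :: M, R, d', ?_, ?_, ?_, ?_⟩
      · rw [List.foldl_cons, hstepA, hA]
        have : pvSkip (pvCnt (x :: M)) l = pvSkip (pvCnt M) (l.erase x) := by
          rw [pvCnt_cons]; exact pvSkip_incr x l (pvCnt M)
        simp [this]
      · rw [List.foldl_cons, hstepB, hB]; simp
      · rw [hR, pvCnt_cons]
        have hdec : (fun y => if y = x then (if y = x then pvCnt M y + 1 else pvCnt M y) - 1
                      else if y = x then pvCnt M y + 1 else pvCnt M y) = pvCnt M := by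
          funext y; by_cases h : y = x <;> simp [h]
        simp [pvSkip, hdec]
      · intro v
        by_cases h : v = x
        · subst h
          have := hle v
          simp [pvCnt] at this ⊢
          omega
        · have := hle v
          simp only [if_neg h] at this
          simpa [pvCnt_cons, h] using this
    · -- unmatched step
      have hcx : c x = 0 := by
        rw [hc]; exact List.count_eq_zero.2 hmem
      have hdx : ¬ d.getD x 0 > 0 := by rw [hd, hcx]; simp
      have hstepA : pvStepA (α, δ, l) x = (α, δ, l) := by
        simp [pvStepA, pvInnerA_eq, hmem]
      have hstepB : pvStepB (μ, ρ, d) x = (μ, ρ ++ [x], d) := by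
        simp [pvStepB, hdx]
      obtain ⟨M, R, d', hA, hB, hR, hle⟩ := ih l c d α δ μ (ρ ++ [x]) hd hc
      refine ⟨M, x :: R, d', ?_, ?_, ?_, hle⟩
      · rw [List.foldl_cons, hstepA, hA]
      · rw [List.foldl_cons, hstepB, hB]; simp
      · have hM0 : pvCnt M x = 0 := Nat.le_zero.1 (hcx ▸ hle x)
        simp only [pvSkip, hM0, if_neg (by omega : ¬ (0 : Nat) > 0)]
        rw [hR]

lemma uloop (xs : List Int) :
    ∀ (c : Int → Nat) (d : PySem.Dict Int Int) (ρ : List Int),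
      (∀ x, d.getD x 0 = (c x : Int)) →
      (xs.foldl pvStepU (ρ, d)).1 = ρ ++ pvSkip c xs := by
  induction xs with
  | nil => intro c d ρ _; simp [pvSkip]
  | cons x xs ih =>
    intro c d ρ hd
    by_cases hc : c x > 0
    · have hdx : d.getD x 0 > 0 := by rw [hd]; exact_mod_cast hc
      have hstep : pvStepU (ρ, d) x = (ρ, d.insert x (d.getD x 0 - 1)) := by
        simp [pvStepU, hdx]
      have hd' : ∀ y, (d.insert x (d.getD x 0 - 1)).getD y 0
          = (((fun y => if y = x then c y - 1 else c y) y : Nat) : Int) := by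
        intro y
        rw [PySem.Dict.getD_insert]
        by_cases h : y = x
        · subst h; simp [hd]; omega
        · have : ¬ ((y : Int) == x) = true := by simpa using h
          simp [h, hd]
      rw [List.foldl_cons, hstep, ih _ _ _ hd']
      simp [pvSkip, hc]
    · have hdx : ¬ d.getD x 0 > 0 := by
        rw [hd]; simpa using Nat.le_of_not_lt hc
      have hstep : pvStepU (ρ, d) x = (ρ ++ [x], d) := by simp [pvStepU, hdx]
      rw [List.foldl_cons, hstep, ih _ _ _ hd]
      simp [pvSkip, hc]

-- the post-swap bodies agree
lemma core_eq (a b : List Int) :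
    (a.foldl pvStepA ([], [], b)).1
      ++ ((a.foldl pvStepA ([], [], b)).2.1.foldl pvRemStep a)
      ++ (a.foldl pvStepA ([], [], b)).2.2
    = pvCoreB a b := by
  have hbuild : ∀ x, (b.foldl pvIncStep PySem.Dict.empty).getD x 0 = ((b.count x : Nat) : Int) := by
    intro x; rw [build_getD]; simp
  obtain ⟨M, R, d', hA, hB, hR, _⟩ :=
    grand a b (fun v => b.count v) (b.foldl pvIncStep PySem.Dict.empty) [] [] [] []
      hbuild (fun _ => rfl)
  simp only [List.nil_append] at hA hB
  have hrem : M.foldl pvRemStep a = pvSkip (pvCnt M) a := by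
    have hfun : pvRemStep = (fun acc n => acc.erase n) := by
      funext acc n; exact pvRemStep_eq_erase acc n
    rw [hfun, foldl_erase_eq_skip]
  have hused : ∀ x, (M.foldl pvIncStep PySem.Dict.empty).getD x 0 = ((pvCnt M x : Nat) : Int) := by
    intro x; rw [build_getD]; simp [pvCnt]
  have hu : (b.foldl pvStepU ([], M.foldl pvIncStep PySem.Dict.empty)).1
      = pvSkip (pvCnt M) b := by
    simpa using uloop b (pvCnt M) _ [] hused
  rw [pvCoreB, hA, hB]
  simp only []
  rw [hrem, hu, hR]

-- ===== VERDICT (by name: the statement is the Claim_ definition above) =====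
theorem new_mas_spec : Claim_equal_new_mas := by
  intro mas1 mas2 _
  unfold Spec_new_mas new_mas new_mas_alt
  by_cases h : mas1.length < mas2.length
  · simp only [if_pos h]; exact core_eq mas2 mas1
  · simp only [if_neg h]; exact core_eq mas1 mas2
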